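-- pv_equiv track=rewrite | github.com/zzzzqs222-png/tv | py/get_iptv.py | match_channels
-- ===== SOURCE A (Python) =====
-- from collections import OrderedDict
--
-- def match_channels(template_channels, all_channels):
--     matched = OrderedDict()
--     for category, names in template_channels.items():
--         matched[category] = OrderedDict()
--         for name in names:
--             primary_name = name.split("|")[0]
--             for src_category, channels in all_channels.items():
--                 for chan_name, chan_url in channels:
--                     if chan_name in name.split("|"):
--                         matched[category].setdefault(primary_name, []).append(chan_url)
--     return matched
-- ===== SOURCE B (Python) =====
-- from collections import OrderedDict
--
-- def match_channels(template_channels, all_channels):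
--     # Build a position-indexed url list per channel name once, then merge per template name.
--     flat = [c for channels in all_channels.values() for c in channels]
--     index = {}
--     for pos, (chan_name, chan_url) in enumerate(flat):
--         index.setdefault(chan_name, []).append((pos, chan_url))
--     result = OrderedDict()
--     for category, names in template_channels.items():
--         inner = OrderedDict()
--         for name in names:
--             aliases = name.split("|")
--             primary = aliases[0]
--             entries = []
--             for alias in dict.fromkeys(aliases):
--                 entries += index.get(alias, [])
--             urls = [u for _, u in sorted(entries, key=lambda t: t[0])]
--             if urls:
--                 inner.setdefault(primary, []).extend(urls)
--         result[category] = inner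
--     return result
-- ===== Notes on version B (the rewrite author's own statement) =====
-- stated objective: faster
-- what changed: B flattens all source channels once into a chan_name -> [(position,url)] index and, per template name, merges the buckets of its distinct aliases by global position, instead of A's full rescan of every source channel for every template name.
import Mathlib
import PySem

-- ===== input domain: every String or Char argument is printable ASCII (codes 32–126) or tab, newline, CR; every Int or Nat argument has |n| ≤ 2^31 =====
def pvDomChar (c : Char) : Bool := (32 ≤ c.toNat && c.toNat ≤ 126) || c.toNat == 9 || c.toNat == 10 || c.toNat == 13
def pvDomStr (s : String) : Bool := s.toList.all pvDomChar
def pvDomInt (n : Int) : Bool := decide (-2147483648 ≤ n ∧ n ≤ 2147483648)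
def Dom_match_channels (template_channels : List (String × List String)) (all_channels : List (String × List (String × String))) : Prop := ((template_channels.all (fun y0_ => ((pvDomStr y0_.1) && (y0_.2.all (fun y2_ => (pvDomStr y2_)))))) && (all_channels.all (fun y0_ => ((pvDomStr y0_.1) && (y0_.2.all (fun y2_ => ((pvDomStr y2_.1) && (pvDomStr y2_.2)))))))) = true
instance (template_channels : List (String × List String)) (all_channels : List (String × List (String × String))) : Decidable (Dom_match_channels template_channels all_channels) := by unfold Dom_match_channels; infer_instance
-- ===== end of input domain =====

-- B replaces A's rescan of every source channel per template name by a chan_name -> [(position, url)] index built once,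
-- merging the buckets of a name's distinct aliases by global position (objective: faster). Return-value equivalence; no mutation.

-- ===== PORT A =====
-- name.split("|"): the separator is the nonempty literal "|", so split? is always `some`
def pvSplitBar (name : String) : List String :=
  (PySem.Str.split? name "|").getD []

def match_channels (template_channels : List (String × List String)) (all_channels : List (String × List (String × String))) : List (String × List (String × List String)) :=
  let matched :=
    template_channels.foldl (fun matched cn =>
      let matched := matched.insert cn.1 (PySem.Dict.empty : PySem.Dict String (List String))
      cn.2.foldl (fun matched name =>
        let primary := (pvSplitBar name).headD ""    -- name.split("|")[0]: split is never empty
        all_channels.foldl (fun matched sc =>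
          sc.2.foldl (fun matched cu =>
            if (pvSplitBar name).contains cu.1 then
              -- matched[category].setdefault(primary, []).append(chan_url); category is always present
              PySem.Dict.modify matched cn.1 PySem.Dict.empty (fun inner =>
                inner.insert primary (inner.getD primary [] ++ [cu.2]))
            else matched) matched) matched) matched)
      (PySem.Dict.empty : PySem.Dict String (PySem.Dict String (List String)))
  matched.items.map (fun kv => (kv.1, kv.2.items))

-- ===== PORT B =====
def match_channels_alt (template_channels : List (String × List String)) (all_channels : List (String × List (String × String))) : List (String × List (String × List String)) :=
  let flat := all_channels.flatMap (fun sc => sc.2)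
  let index := (PySem.List.enumerate flat).foldl
      (fun d e => PySem.Dict.modify d e.2.1 [] (fun l => l ++ [(e.1, e.2.2)]))
      (PySem.Dict.empty : PySem.Dict String (List (Int × String)))
  let result := template_channels.foldl (fun result cn =>
      let inner := cn.2.foldl (fun inner name =>
          let aliases := pvSplitBar name
          let primary := aliases.headD ""
          let entries := (PySem.List.dedup aliases).foldl (fun acc a => acc ++ index.getD a []) []
          let urls := (PySem.List.sorted entries (fun t => t.1)).map (fun t => t.2)
          if urls = [] then inner else inner.insert primary (inner.getD primary [] ++ urls))
        (PySem.Dict.empty : PySem.Dict String (List String))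
      result.insert cn.1 inner)
    (PySem.Dict.empty : PySem.Dict String (PySem.Dict String (List String)))
  result.items.map (fun kv => (kv.1, kv.2.items))

-- ===== PRECONDITION & SPEC =====
def Spec_match_channels (template_channels : List (String × List String)) (all_channels : List (String × List (String × String))) (out : List (String × List (String × List String))) : Prop := out = match_channels_alt template_channels all_channels
instance (template_channels : List (String × List String)) (all_channels : List (String × List (String × String))) (out : List (String × List (String × List String))) : Decidable (Spec_match_channels template_channels all_channels out) := by unfold Spec_match_channels; infer_instance

-- ===== CLAIM (what is proved, stated in full; the proofs are below) =====
def Claim_equal_match_channels : Prop := ∀ (template_channels : List (String × List String)) (all_channels : List (String × List (String × String))), Dom_match_channels template_channels all_channels → Spec_match_channels template_channels all_channels (match_channels template_channels all_channels)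

-- ===== LEMMAS AND PROOFS =====

-- the channels of `name`'s aliases, in global source order, and the common normal form of both ports
def pvMatchedOf (all_channels : List (String × List (String × String))) (name : String) : List (String × String) :=
  (all_channels.flatMap (fun sc => sc.2)).filter (fun cu => (pvSplitBar name).contains cu.1)

def pvInnerStep (all_channels : List (String × List (String × String))) (inner : PySem.Dict String (List String)) (name : String) : PySem.Dict String (List String) :=
  if pvMatchedOf all_channels name = [] then inner
  else inner.insert ((pvSplitBar name).headD "")
         (inner.getD ((pvSplitBar name).headD "") [] ++ (pvMatchedOf all_channels name).map (fun cu => cu.2))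

def pvNormal (template_channels : List (String × List String)) (all_channels : List (String × List (String × String))) : List (String × List (String × List String)) :=
  (template_channels.foldl (fun m cn =>
      m.insert cn.1 (cn.2.foldl (pvInnerStep all_channels) (PySem.Dict.empty : PySem.Dict String (List String))))
    (PySem.Dict.empty : PySem.Dict String (PySem.Dict String (List String)))).items.map (fun kv => (kv.1, kv.2.items))

-- a double loop over the categories' channel lists is a loop over the flattened list
theorem pv_foldl_foldl_flatMap {α β γ : Type} (l : List (α × List β)) (f : γ → β → γ) (init : γ) :
    l.foldl (fun s sc => sc.2.foldl f s) init = (l.flatMap (fun sc => sc.2)).foldl f init := by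
  induction l generalizing init with
  | nil => rfl
  | cons x t ih => simp [List.foldl_append, ih]

-- appending matched urls one at a time at a fixed key
theorem pv_appendFold (l : List (String × String)) (p : String) (inn : PySem.Dict String (List String)) :
    l.foldl (fun inn cu => inn.insert p (inn.getD p [] ++ [cu.2])) inn
      = if l = [] then inn else inn.insert p (inn.getD p [] ++ l.map (fun cu => cu.2)) := by
  induction l generalizing inn with
  | nil => rfl
  | cons c t ih =>
    simp only [List.foldl_cons, ih]
    by_cases ht : t = []
    · simp [ht]
    · simp [ht, PySem.Dict.getD_insert_self, PySem.Dict.insert_insert_self]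

-- a loop of conditional modifies at one fixed key updates just that key
theorem pv_foldl_ifModify_insert {β ν : Type} (l : List β) (P : β → Bool) (g : β → ν → ν)
    (c : String) (d0 : ν) (m : PySem.Dict String ν) (v : ν) :
    l.foldl (fun m x => if P x then PySem.Dict.modify m c d0 (g x) else m) (m.insert c v)
      = m.insert c (l.foldl (fun w x => if P x then g x w else w) v) := by
  induction l generalizing v with
  | nil => rfl
  | cons x t ih =>
    simp only [List.foldl_cons]
    by_cases h : P x
    · have hm : PySem.Dict.modify (m.insert c v) c d0 (g x)
          = (m.insert c v).insert c (g x ((m.insert c v).getD c d0)) := rfl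
      rw [if_pos h, if_pos h, hm, PySem.Dict.getD_insert_self, PySem.Dict.insert_insert_self, ih]
    · rw [if_neg h, if_neg h, ih]

-- one category of A: the nested scans update exactly the entry at the category key
theorem pv_catA (names : List String) (acs : List (String × List (String × String))) (c : String)
    (m : PySem.Dict String (PySem.Dict String (List String))) (v : PySem.Dict String (List String)) :
    names.foldl (fun matched name =>
        acs.foldl (fun matched sc =>
          sc.2.foldl (fun matched cu =>
            if (pvSplitBar name).contains cu.1 then
              PySem.Dict.modify matched c PySem.Dict.empty (fun inner =>
                inner.insert ((pvSplitBar name).headD "")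
                  (inner.getD ((pvSplitBar name).headD "") [] ++ [cu.2]))
            else matched) matched) matched) (m.insert c v)
      = m.insert c (names.foldl (pvInnerStep acs) v) := by
  induction names generalizing v with
  | nil => rfl
  | cons name t ih =>
    simp only [List.foldl_cons]
    rw [pv_foldl_foldl_flatMap, pv_foldl_ifModify_insert, PySem.List.foldl_if_eq_foldl_filter,
      pv_appendFold, ih]
    unfold pvInnerStep pvMatchedOf
    rfl

theorem pv_A_eq_normal (tcs : List (String × List String)) (acs : List (String × List (String × String))) :
    match_channels tcs acs = pvNormal tcs acs := by
  unfold match_channels pvNormal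
  refine congrArg (fun d : PySem.Dict String (PySem.Dict String (List String)) =>
    d.items.map (fun kv => (kv.1, kv.2.items))) ?_
  refine PySem.List.foldl_congr_mem _ _ _ _ ?_
  intro m cn _
  exact pv_catA cn.2 acs cn.1 m PySem.Dict.empty

-- disjoint filters concatenate up to permutation
theorem pv_perm_filter_or {γ : Type} (l : List γ) (p q : γ → Bool) (hpq : ∀ x, ¬(p x = true ∧ q x = true)) :
    (l.filter (fun x => p x || q x)).Perm (l.filter p ++ l.filter q) := by
  induction l with
  | nil => simp
  | cons x t ih =>
    by_cases hp : p x
    · have hq : q x = false := by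
        cases h : q x
        · rfl
        · exact absurd ⟨hp, h⟩ (hpq x)
      simpa [hp, hq] using ih.cons x
    · by_cases hq : q x
      · simpa [hp, hq] using ((ih.cons x).trans (List.perm_middle).symm)
      · simpa [hp, hq] using ih

-- filtering by membership in a duplicate-free key list is, up to permutation, bucket concatenation
theorem pv_perm_filter_contains (S : List String) (hS : S.Nodup) (l : List (Int × (String × String))) :
    (l.filter (fun e => S.contains e.2.1)).Perm (S.flatMap (fun a => l.filter (fun e => e.2.1 == a))) := by
  induction S with
  | nil => simp
  | cons a S' ih =>
    have hS' : S'.Nodup := hS.of_cons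
    have ha : a ∉ S' := by simpa using (List.nodup_cons.mp hS).1
    have hdisj : ∀ e : Int × (String × String), ¬((e.2.1 == a) = true ∧ S'.contains e.2.1 = true) := by
      intro e ⟨h1, h2⟩
      exact ha (by simpa [beq_iff_eq.mp h1] using (List.contains_iff_mem.mp h2))
    have h1 : (l.filter (fun e => (a :: S').contains e.2.1)).Perm
        (l.filter (fun e => e.2.1 == a) ++ l.filter (fun e => S'.contains e.2.1)) := by
      simpa [List.contains_cons] using pv_perm_filter_or l (fun e => e.2.1 == a) (fun e => S'.contains e.2.1) hdisj
    simpa using h1.trans ((ih hS').append_left (l.filter (fun e => e.2.1 == a)))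

-- B's index lookup, characterised
theorem pv_index_getD (acs : List (String × List (String × String))) (a : String) :
    ((PySem.List.enumerate (acs.flatMap (fun sc => sc.2))).foldl
        (fun d e => PySem.Dict.modify d e.2.1 [] (fun l => l ++ [(e.1, e.2.2)]))
        (PySem.Dict.empty : PySem.Dict String (List (Int × String)))).getD a []
      = ((PySem.List.enumerate (acs.flatMap (fun sc => sc.2))).filter (fun e => e.2.1 == a)).map (fun e => (e.1, e.2.2)) := by
  have h1 : ((PySem.List.enumerate (acs.flatMap (fun sc => sc.2))).map
        (fun e => (e.2.1, (e.1, e.2.2)))).foldl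
        (fun (d : PySem.Dict String (List (Int × String))) p => PySem.Dict.modify d p.1 [] (fun l => l ++ [p.2]))
        PySem.Dict.empty
      = (PySem.List.enumerate (acs.flatMap (fun sc => sc.2))).foldl
        (fun d e => PySem.Dict.modify d e.2.1 [] (fun l => l ++ [(e.1, e.2.2)]))
        PySem.Dict.empty := List.foldl_map
  rw [← h1, PySem.Dict.getD_foldl_modify_append, PySem.Dict.getD_empty, List.nil_append,
    List.filter_map, List.map_map]
  rfl

-- B's sorted bucket merge equals A's order-preserving filter
theorem pv_urls_eq (acs : List (String × List (String × String))) (name : String) :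
    (PySem.List.sorted
        ((PySem.List.dedup (pvSplitBar name)).foldl
          (fun acc a => acc ++ ((PySem.List.enumerate (acs.flatMap (fun sc => sc.2))).foldl
              (fun d e => PySem.Dict.modify d e.2.1 [] (fun l => l ++ [(e.1, e.2.2)]))
              (PySem.Dict.empty : PySem.Dict String (List (Int × String)))).getD a []) [])
        (fun t => t.1)).map (fun t => t.2)
      = (pvMatchedOf acs name).map (fun cu => cu.2) := by
  have hc : ∀ x : String, (PySem.List.dedup (pvSplitBar name)).contains x = (pvSplitBar name).contains x := by
    intro x
    simp [List.contains_eq_mem]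
  have hperm : (((PySem.List.enumerate (acs.flatMap (fun sc => sc.2))).filter
        (fun e => (pvSplitBar name).contains e.2.1)).map (fun e => (e.1, e.2.2))).Perm
      ((PySem.List.dedup (pvSplitBar name)).flatMap
        (fun a => ((PySem.List.enumerate (acs.flatMap (fun sc => sc.2))).filter
          (fun e => e.2.1 == a)).map (fun e => (e.1, e.2.2)))) := by
    rw [← List.map_flatMap]
    refine List.Perm.map _ ?_
    have := pv_perm_filter_contains (PySem.List.dedup (pvSplitBar name))
      (PySem.List.nodup_dedup (pvSplitBar name)) (PySem.List.enumerate (acs.flatMap (fun sc => sc.2)))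
    simpa [hc] using this
  have hpw : (((PySem.List.enumerate (acs.flatMap (fun sc => sc.2))).filter
        (fun e => (pvSplitBar name).contains e.2.1)).map (fun e => (e.1, e.2.2))).Pairwise
      (fun p q : Int × String => p.1 < q.1) := by
    rw [List.pairwise_map]
    exact List.Pairwise.filter _ (PySem.List.pairwise_lt_enumerate (acs.flatMap (fun sc => sc.2)) 0)
  rw [PySem.List.foldl_append_eq_flatMap, List.nil_append]
  simp only [pv_index_getD]
  rw [PySem.List.sorted_eq_of_perm_of_pairwise_lt _ _ _ hperm hpw, List.map_map]
  show _ = ((acs.flatMap (fun sc => sc.2)).filter (fun cu => (pvSplitBar name).contains cu.1)).map (fun cu => cu.2)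
  conv_rhs => rw [← PySem.List.map_snd_enumerate (acs.flatMap (fun sc => sc.2)) 0]
  rw [List.filter_map, List.map_map]
  simp [Function.comp_def]

-- one template name of B equals the normal-form step
theorem pv_stepB (acs : List (String × List (String × String))) (inner : PySem.Dict String (List String)) (name : String) :
    (if (PySem.List.sorted
          ((PySem.List.dedup (pvSplitBar name)).foldl
            (fun acc a => acc ++ ((PySem.List.enumerate (acs.flatMap (fun sc => sc.2))).foldl
                (fun d e => PySem.Dict.modify d e.2.1 [] (fun l => l ++ [(e.1, e.2.2)]))
                (PySem.Dict.empty : PySem.Dict String (List (Int × String)))).getD a []) [])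
          (fun t => t.1)).map (fun t => t.2) = []
      then inner
      else inner.insert ((pvSplitBar name).headD "")
        (inner.getD ((pvSplitBar name).headD "") [] ++
          (PySem.List.sorted
            ((PySem.List.dedup (pvSplitBar name)).foldl
              (fun acc a => acc ++ ((PySem.List.enumerate (acs.flatMap (fun sc => sc.2))).foldl
                  (fun d e => PySem.Dict.modify d e.2.1 [] (fun l => l ++ [(e.1, e.2.2)]))
                  (PySem.Dict.empty : PySem.Dict String (List (Int × String)))).getD a []) [])
            (fun t => t.1)).map (fun t => t.2)))
      = pvInnerStep acs inner name := by
  rw [pv_urls_eq acs name]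
  unfold pvInnerStep
  by_cases h : pvMatchedOf acs name = [] <;> simp [h]

theorem pv_B_eq_normal (tcs : List (String × List String)) (acs : List (String × List (String × String))) :
    match_channels_alt tcs acs = pvNormal tcs acs := by
  unfold match_channels_alt pvNormal
  refine congrArg (fun d : PySem.Dict String (PySem.Dict String (List String)) =>
    d.items.map (fun kv => (kv.1, kv.2.items))) ?_
  refine PySem.List.foldl_congr_mem _ _ _ _ ?_
  intro m cn _
  refine congrArg (fun w => m.insert cn.1 w) ?_
  refine PySem.List.foldl_congr_mem _ _ _ _ ?_
  intro inner name _
  exact pv_stepB acs inner name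

-- ===== VERDICT (by name: the statement is the Claim_ definition above) =====
theorem match_channels_spec : Claim_equal_match_channels := by
  intro tcs acs _
  show match_channels tcs acs = match_channels_alt tcs acs
  rw [pv_A_eq_normal, pv_B_eq_normal]
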